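-- pv_equiv track=rewrite | github.com/PixelKnightDev/nash-equilibrium-finder | analyze_game.py | dominant_strategy_A
-- ===== SOURCE A (Python) =====
-- def dominant_strategy_A(A):
--
--     num_rows = len(A)
--     num_cols = len(A[0])
--
--     for r in range(num_rows):
--
--         always_better = True
--
--         for other in range(num_rows):
--
--             if r == other:
--                 continue
--
--             for c in range(num_cols):
--
--                 if A[r][c] < A[other][c]:
--                     always_better = False
--
--         if always_better:
--             return r
--
--     return None
-- ===== SOURCE B (Python) =====
-- def dominant_strategy_A(A):
--     k = len(A[0])
--     colmax = [max(row[c] for row in A) for c in range(k)]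
--     for i, row in enumerate(A):
--         if all(x == m for m, x in zip(colmax, row)):
--             return i
--     return None
-- ===== Notes on version B (the rewrite author's own statement) =====
-- stated objective: faster
-- what changed: Instead of comparing every row against every other row (nested row scans), B precomputes per-column maxima once and returns the first row equal to the column-max vector.
import Mathlib
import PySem

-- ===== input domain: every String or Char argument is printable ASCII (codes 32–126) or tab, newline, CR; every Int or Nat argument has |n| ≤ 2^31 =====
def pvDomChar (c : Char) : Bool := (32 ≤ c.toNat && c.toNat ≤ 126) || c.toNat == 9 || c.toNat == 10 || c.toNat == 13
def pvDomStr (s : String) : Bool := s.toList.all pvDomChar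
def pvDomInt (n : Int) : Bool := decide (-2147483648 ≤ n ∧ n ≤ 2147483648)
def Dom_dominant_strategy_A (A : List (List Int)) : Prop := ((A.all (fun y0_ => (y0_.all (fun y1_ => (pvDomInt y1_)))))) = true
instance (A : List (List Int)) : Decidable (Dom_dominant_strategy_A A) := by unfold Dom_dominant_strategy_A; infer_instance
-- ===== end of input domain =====

-- B replaces A's all-pairs row comparison by one pass of per-column maxima, then picks
-- the first row equal to the column-max vector (asymptotically fewer comparisons).

-- ===== PORT A =====
-- A[r][c] on in-range indices (Pre_ keeps every index used by either program in range)
def pvCell (A : List (List Int)) (r c : Nat) : Int := (A.getD r []).getD c 0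

-- the 'always_better' flag computed by A's two inner loops for row r
def pvAlwaysA (A : List (List Int)) (numRows numCols r : Nat) : Bool :=
  (List.range numRows).foldl (fun b other =>
    if r = other then b
    else (List.range numCols).foldl (fun b2 c =>
      if pvCell A r c < pvCell A other c then false else b2) b) true

-- A's outer 'for r in range(num_rows)' with early return
def pvLoopA (A : List (List Int)) (numRows numCols : Nat) : Nat → Nat → Option Int
  | 0, _ => none
  | m + 1, r => if pvAlwaysA A numRows numCols r then some (r : Int)
                else pvLoopA A numRows numCols m (r + 1)

def dominant_strategy_A (A : List (List Int)) : Option Int :=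
  let numRows := A.length
  let numCols := (A.headD []).length
  pvLoopA A numRows numCols numRows 0

-- ===== PORT B =====
-- max(generator) over a nonempty list (B never calls it on [])
def pvMaxList : List Int → Int
  | [] => 0
  | x :: xs => xs.foldl max x

-- colmax = [max(row[c] for row in A) for c in range(k)]
def pvColMax (A : List (List Int)) (k : Nat) : List Int :=
  (List.range k).map (fun c => pvMaxList (A.map (fun row => row.getD c 0)))

-- all(x == m for m, x in zip(colmax, row))
def pvRowEq (colmax row : List Int) : Bool :=
  (colmax.zip row).all (fun p => p.2 == p.1)

-- for i, row in enumerate(A) with early return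
def pvFindDom (colmax : List Int) : List (List Int) → Nat → Option Int
  | [], _ => none
  | row :: rest, i => if pvRowEq colmax row then some (i : Int)
                      else pvFindDom colmax rest (i + 1)

def dominant_strategy_A_alt (A : List (List Int)) : Option Int :=
  let k := (A.headD []).length
  let colmax := pvColMax A k
  pvFindDom colmax A 0

-- ===== PRECONDITION & SPEC =====
-- Pre_ excludes exactly the inputs where A raises IndexError: the empty matrix
-- (len(A[0]) fails) and matrices with a row shorter than the first row.
def Pre_dominant_strategy_A (A : List (List Int)) : Prop :=
  A ≠ [] ∧ ∀ row ∈ A, (A.headD []).length ≤ row.length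
instance (A : List (List Int)) : Decidable (Pre_dominant_strategy_A A) := by
  unfold Pre_dominant_strategy_A; infer_instance

def pvWitness_dominant_strategy_A : List (List Int) := [[1, 2], [3, 1]]

def Spec_dominant_strategy_A (A : List (List Int)) (out : Option Int) : Prop := out = dominant_strategy_A_alt A
instance (A : List (List Int)) (out : Option Int) : Decidable (Spec_dominant_strategy_A A out) := by unfold Spec_dominant_strategy_A; infer_instance

-- ===== CLAIM (what is proved, stated in full; the proofs are below) =====
def Claim_equal_dominant_strategy_A : Prop := ∀ (A : List (List Int)), Dom_dominant_strategy_A A → Pre_dominant_strategy_A A → Spec_dominant_strategy_A A (dominant_strategy_A A)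

-- ===== LEMMAS AND PROOFS =====

-- A's inner column loop is an 'all' over the columns
theorem pv_foldl_if_false (p : Nat → Prop) [DecidablePred p] (l : List Nat) (b : Bool) :
    l.foldl (fun b2 c => if p c then false else b2) b = (b && l.all (fun c => !(decide (p c)))) := by
  induction l generalizing b with
  | nil => simp
  | cons x xs ih =>
      simp only [List.foldl_cons, List.all_cons, ih]
      by_cases hp : p x <;> simp [hp]

theorem pv_foldl_and (g : Nat → Bool) (l : List Nat) (b : Bool) :
    l.foldl (fun b o => b && g o) b = (b && l.all g) := by
  induction l generalizing b with
  | nil => simp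
  | cons x xs ih => simp [ih, Bool.and_assoc]

theorem pvAlwaysA_eq (A : List (List Int)) (numRows numCols r : Nat) :
    pvAlwaysA A numRows numCols r =
      (List.range numRows).all (fun o =>
        (r == o) || (List.range numCols).all (fun c => !(pvCell A r c < pvCell A o c))) := by
  unfold pvAlwaysA
  have hf : (fun (b : Bool) (other : Nat) =>
      if r = other then b
      else (List.range numCols).foldl (fun b2 c =>
        if pvCell A r c < pvCell A other c then false else b2) b)
      = (fun (b : Bool) (o : Nat) =>
          b && ((r == o) || (List.range numCols).all
            (fun c => !(pvCell A r c < pvCell A o c)))) := by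
    funext b o
    by_cases h : r = o
    · simp [h]
    · rw [if_neg h, pv_foldl_if_false]
      rw [show (r == o) = false by simp [h], Bool.false_or]
  rw [hf, pv_foldl_and]
  simp

-- zip-all as a pointwise statement
theorem pv_zip_all (u v : List Int) :
    ((u.zip v).all (fun p => p.2 == p.1) = true) ↔
      ∀ i, i < u.length → i < v.length → v.getD i 0 = u.getD i 0 := by
  induction u generalizing v with
  | nil => simp
  | cons x xs ih =>
      cases v with
      | nil => simp
      | cons y ys =>
          simp only [List.zip_cons_cons, List.all_cons, Bool.and_eq_true, beq_iff_eq, ih]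
          constructor
          · rintro ⟨h0, h⟩ i hi hj
            cases i with
            | zero => simpa using h0
            | succ n => exact h n (by simpa using hi) (by simpa using hj)
          · intro h
            refine ⟨by simpa using h 0 (by simp) (by simp), fun n hn hm => ?_⟩
            simpa using h (n + 1) (by simpa using hn) (by simpa using hm)

theorem pvColMax_getD (A : List (List Int)) (k c : Nat) (hc : c < k) :
    (pvColMax A k).getD c 0 = pvMaxList (A.map (fun row => row.getD c 0)) := by
  simp [pvColMax, List.getD_eq_getElem?_getD, hc]

theorem pv_le_foldl_max (xs : List Int) (a y : Int) (h : y ≤ a ∨ y ∈ xs) :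
    y ≤ xs.foldl max a := by
  induction xs generalizing a with
  | nil =>
      simp only [List.foldl_nil]
      rcases h with h | h
      · exact h
      · simp at h
  | cons x t ih =>
      simp only [List.foldl_cons]
      rcases h with h | h
      · exact ih (max a x) (Or.inl (le_trans h (le_max_left a x)))
      · rcases List.mem_cons.mp h with h | h
        · exact ih (max a x) (Or.inl (h ▸ le_max_right a x))
        · exact ih (max a x) (Or.inr h)

theorem pv_foldl_max_mem (xs : List Int) (a : Int) :
    xs.foldl max a = a ∨ xs.foldl max a ∈ xs := by
  induction xs generalizing a with
  | nil => simp
  | cons x t ih =>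
      simp only [List.foldl_cons]
      rcases ih (max a x) with h | h
      · rcases max_choice a x with hm | hm
        · left; rw [h, hm]
        · right; rw [h, hm]; simp
      · right; exact List.mem_cons_of_mem _ h

theorem pvMaxList_mem (xs : List Int) (hne : xs ≠ []) : pvMaxList xs ∈ xs := by
  cases xs with
  | nil => exact absurd rfl hne
  | cons x t =>
      rcases pv_foldl_max_mem t x with h | h
      · simp [pvMaxList, h]
      · exact List.mem_cons_of_mem _ (by simpa [pvMaxList] using h)

theorem pv_le_pvMaxList (xs : List Int) (y : Int) (h : y ∈ xs) : y ≤ pvMaxList xs := by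
  cases xs with
  | nil => simp at h
  | cons x t =>
      rcases List.mem_cons.mp h with h | h
      · exact pv_le_foldl_max t x y (Or.inl (le_of_eq h))
      · exact pv_le_foldl_max t x y (Or.inr h)

-- membership of the c-th column
theorem pv_col_mem (A : List (List Int)) (o c : Nat) (ho : o < A.length) :
    pvCell A o c ∈ A.map (fun row => row.getD c 0) := by
  have : A.getD o [] ∈ A := by
    rw [List.getD_eq_getElem?_getD, List.getElem?_eq_getElem ho]
    exact List.getElem_mem _
  exact List.mem_map.mpr ⟨A.getD o [], this, rfl⟩

-- the per-row condition of A equals the per-row condition of B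
theorem pv_cond_eq (A : List (List Int)) (k r : Nat) (hr : r < A.length)
    (hpre : ∀ row ∈ A, k ≤ row.length) :
    pvRowEq (pvColMax A k) (A.getD r []) = pvAlwaysA A A.length k r := by
  have hAne : A ≠ [] := by intro h; rw [h] at hr; simp at hr
  have hrowlen : ∀ o, o < A.length → k ≤ (A.getD o []).length := by
    intro o ho
    apply hpre
    rw [List.getD_eq_getElem?_getD, List.getElem?_eq_getElem ho]
    exact List.getElem_mem _
  have hcmlen : (pvColMax A k).length = k := by simp [pvColMax]
  rw [pvAlwaysA_eq]
  -- reduce both sides to Props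
  rcases hb : pvRowEq (pvColMax A k) (A.getD r []) with _ | _
  · -- B-side false: find a column where row r is below the max; A-side must be false
    symm
    rw [List.all_eq_false]
    have hnot : ¬ ∀ i, i < k → i < (A.getD r []).length →
        (A.getD r []).getD i 0 = (pvColMax A k).getD i 0 := by
      intro h
      have := (pv_zip_all (pvColMax A k) (A.getD r [])).mpr
        (fun i hi hj => h i (by rw [hcmlen] at hi; exact hi) hj)
      rw [pvRowEq] at hb; rw [hb] at this; exact absurd this (by simp)
    push Not at hnot
    obtain ⟨c, hck, hcr, hne⟩ := hnot
    -- row r's entry is strictly below the column max, reached at some row o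
    have hle : pvCell A r c ≤ pvMaxList (A.map (fun row => row.getD c 0)) :=
      pv_le_pvMaxList _ _ (pv_col_mem A r c hr)
    have hlt : pvCell A r c < pvMaxList (A.map (fun row => row.getD c 0)) := by
      rcases lt_or_eq_of_le hle with h | h
      · exact h
      · exfalso; apply hne; rw [pvColMax_getD A k c hck, ← h]; rfl
    have hmem := pvMaxList_mem (A.map (fun row => row.getD c 0)) (by simpa using hAne)
    obtain ⟨row, hrow, hval⟩ := List.mem_map.mp hmem
    obtain ⟨o, ho, hoe⟩ := List.mem_iff_getElem.mp hrow
    have hor : ¬ (r == o) = true := by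
      intro h
      have : r = o := by simpa using h
      subst this
      have : pvCell A r c = pvMaxList (A.map (fun row => row.getD c 0)) := by
        rw [← hval, ← hoe]; simp [pvCell, List.getD_eq_getElem?_getD, List.getElem?_eq_getElem ho]
      omega
    have hcello : pvCell A o c = pvMaxList (A.map (fun row => row.getD c 0)) := by
      rw [← hval, ← hoe]; simp [pvCell, List.getD_eq_getElem?_getD, List.getElem?_eq_getElem ho]
    refine ⟨o, by simpa using ho, ?_⟩
    have hrne : (r == o) = false := by simpa using hor
    have h2 : ((List.range k).all (fun c' => !(decide (pvCell A r c' < pvCell A o c')))) = false := by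
      rw [List.all_eq_false]
      refine ⟨c, List.mem_range.mpr hck, ?_⟩
      have hlt2 : pvCell A r c < pvCell A o c := by omega
      simp [hlt2]
    simp [hrne, h2]
  · -- B-side true: row r equals the column max everywhere; A-side must be true
    symm
    rw [List.all_eq_true]
    have hpt := (pv_zip_all (pvColMax A k) (A.getD r [])).mp (by rw [pvRowEq] at hb; exact hb)
    intro o ho
    rw [List.mem_range] at ho
    by_cases hro : r = o
    · simp [hro]
    · simp only [Bool.or_eq_true, List.all_eq_true]
      right
      intro c hc
      rw [List.mem_range] at hc
      have hrc : (A.getD r []).getD c 0 = (pvColMax A k).getD c 0 :=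
        hpt c (by rw [hcmlen]; exact hc) (lt_of_lt_of_le hc (hrowlen r hr))
      have hmax : pvCell A r c = pvMaxList (A.map (fun row => row.getD c 0)) := by
        simp only [pvCell]
        rw [hrc, pvColMax_getD A k c hc]
      have : pvCell A o c ≤ pvMaxList (A.map (fun row => row.getD c 0)) :=
        pv_le_pvMaxList _ _ (pv_col_mem A o c ho)
      simp; omega

-- the two early-return scans agree step by step
theorem pv_loops_eq (A : List (List Int)) (k : Nat)
    (hpre : ∀ row ∈ A, k ≤ row.length) :
    ∀ (m i : Nat), i + m = A.length →
      pvLoopA A A.length k m i =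
        pvFindDom (pvColMax A k) (A.drop i) i := by
  intro m
  induction m with
  | zero =>
      intro i hi
      have : A.drop i = [] := List.drop_eq_nil_of_le (by omega)
      simp [pvLoopA, pvFindDom, this]
  | succ n ih =>
      intro i hi
      have hiA : i < A.length := by omega
      have hdrop : A.drop i = A.getD i [] :: A.drop (i + 1) := by
        rw [List.getD_eq_getElem?_getD, List.getElem?_eq_getElem hiA]
        simpa using (List.drop_eq_getElem_cons hiA)
      rw [hdrop]
      simp only [pvLoopA, pvFindDom]
      rw [pv_cond_eq A k i hiA hpre]
      by_cases h : pvAlwaysA A A.length k i = true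
      · simp [h]
      · simp only [Bool.not_eq_true] at h
        simp [h, ih (i + 1) (by omega)]

-- ===== VERDICT (by name: the statement is the Claim_ definition above) =====
theorem dominant_strategy_A_spec : Claim_equal_dominant_strategy_A := by
  intro A _ hpre
  unfold Spec_dominant_strategy_A dominant_strategy_A dominant_strategy_A_alt
  simpa using pv_loops_eq A ((A.headD []).length) hpre.2 A.length 0 (by omega)
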